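-- pv_equiv track=rewrite | github.com/skyrimer/DBL-Micro-Soft | Split 2/Conversations/conversation_algorithm.py | trace_conversation
-- ===== SOURCE A (Python) =====
-- def trace_conversation(start_tweet_id: str, tweet_dict: dict):
--     convo = []
--     current_tweet_id = start_tweet_id
--     users_in_conversation = set()
--     local_processed_tweet_ids = set()  # Local set to track the current conversation
--     while (
--         current_tweet_id
--         and current_tweet_id in tweet_dict
--         and current_tweet_id not in local_processed_tweet_ids
--     ):
--         tweet_info = tweet_dict[current_tweet_id]
--         convo.append(current_tweet_id)
--         users_in_conversation.add(tweet_info['user_id'])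
--         local_processed_tweet_ids.add(current_tweet_id)
--         if len(users_in_conversation) > 2:
--             return convo[:-1][::-1], users_in_conversation  # As soon as the third user appears, we delete his tweet and return
--         current_tweet_id = tweet_info['replied_tweet_id']
--     return (convo[::-1], users_in_conversation) if len(users_in_conversation) == 2 else (None, users_in_conversation)
-- ===== SOURCE B (Python) =====
-- def trace_conversation(start_tweet_id: str, tweet_dict: dict):
--     # Phase 1: follow the reply pointers and record the chain of tweet ids.
--     chain = []
--     visited = set()
--     tid = start_tweet_id
--     while tid and tid in tweet_dict and tid not in visited:
--         chain.append(tid)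
--         visited.add(tid)
--         tid = tweet_dict[tid].get('replied_tweet_id')
--     # Phase 2: scan the chain, collecting users, until a third user appears.
--     users = set()
--     for i, tid in enumerate(chain):
--         users.add(tweet_dict[tid]['user_id'])
--         if len(users) > 2:
--             return chain[:i][::-1], users
--     return (chain[::-1], users) if len(users) == 2 else (None, users)
-- ===== Notes on version B (the rewrite author's own statement) =====
-- stated objective: alternative
-- what changed: A's single while-loop that collects the convo, the user set and the early third-user return in one pass is split into two phases: build the reply chain by pointer-chasing (pointer read via dict.get), then scan that chain accumulating users and cutting at the third user.
import Mathlib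
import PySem

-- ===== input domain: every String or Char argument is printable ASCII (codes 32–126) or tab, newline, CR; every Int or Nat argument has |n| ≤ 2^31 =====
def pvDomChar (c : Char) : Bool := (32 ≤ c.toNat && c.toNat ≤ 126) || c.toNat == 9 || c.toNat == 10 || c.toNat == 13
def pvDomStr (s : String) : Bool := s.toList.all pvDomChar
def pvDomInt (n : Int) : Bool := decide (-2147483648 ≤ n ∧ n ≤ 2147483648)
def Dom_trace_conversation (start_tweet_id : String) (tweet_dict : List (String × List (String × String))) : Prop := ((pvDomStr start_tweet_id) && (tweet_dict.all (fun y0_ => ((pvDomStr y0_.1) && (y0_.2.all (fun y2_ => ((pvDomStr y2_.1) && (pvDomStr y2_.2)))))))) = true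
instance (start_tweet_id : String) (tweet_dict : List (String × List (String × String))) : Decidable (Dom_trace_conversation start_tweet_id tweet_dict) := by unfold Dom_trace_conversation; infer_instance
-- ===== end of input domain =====

-- B splits A's single early-returning walk into two phases — build the reply chain, then scan it for the third user — trading nothing for speed (objective: alternative).


-- ===== PORT A =====
-- the trailing 'return (convo[::-1], users) if len(users) == 2 else (None, users)'
def traceFinishA (convo : List String) (users : PySem.Set String) : Option (List String) × List String :=
  if PySem.Set.len users == 2 then (some ((PySem.List.slice? convo none none (-1)).getD []), users)
  else (none, users)

-- A's while-loop; fuel = |tweet_dict| + 1 exceeds the possible iterations (each one adds a new dict key to visited)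
def traceLoopA (td : List (String × List (String × String))) :
    Nat → String → List String → PySem.Set String → PySem.Set String → Option (List String) × List String
  | 0, _, convo, users, _ => traceFinishA convo users
  | n + 1, cur, convo, users, visited =>
    match (PySem.Dict.mk td).get? cur with
    | none => traceFinishA convo users            -- 'cur in tweet_dict' is false: loop exits
    | some info =>
      if cur ≠ "" ∧ cur ∉ visited then
        let convo' := convo ++ [cur]
        match (PySem.Dict.mk info).get? "user_id" with
        | none => (none, [])                      -- Python raises KeyError here: outside Pre_
        | some u =>
          let users' := PySem.Set.add users u
          let visited' := PySem.Set.add visited cur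
          if 2 < PySem.Set.len users' then
            (some ((PySem.List.slice? (PySem.List.slice convo' none (some (-1))) none none (-1)).getD []), users')
          else
            match (PySem.Dict.mk info).get? "replied_tweet_id" with
            | none => (none, [])                  -- Python raises KeyError here: outside Pre_
            | some nxt => traceLoopA td n nxt convo' users' visited'
      else traceFinishA convo users

def trace_conversation (start_tweet_id : String) (tweet_dict : List (String × List (String × String))) : Option (List String) × List String :=
  traceLoopA tweet_dict (tweet_dict.length + 1) start_tweet_id [] PySem.Set.empty PySem.Set.empty

-- ===== PORT B =====
-- Phase 1: follow the reply pointers, recording the chain of ids ('.get' returning None is ported as "", falsy like None)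
def buildChainB (td : List (String × List (String × String))) :
    Nat → String → PySem.Set String → List String
  | 0, _, _ => []
  | n + 1, tid, visited =>
    match (PySem.Dict.mk td).get? tid with
    | none => []
    | some info =>
      if tid ≠ "" ∧ tid ∉ visited then
        tid :: buildChainB td n ((PySem.Dict.mk info).getD "replied_tweet_id" "") (PySem.Set.add visited tid)
      else []

-- Phase 2: scan the chain, collecting users, until a third user appears ('done' = chain[:i], the part already scanned)
def scanChainB (td : List (String × List (String × String))) :
    List String → List String → PySem.Set String → Option (List String) × List String
  | [], done, users =>
    if PySem.Set.len users == 2 then (some done.reverse, users) else (none, users)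
  | tid :: rest, done, users =>
    match (PySem.Dict.mk td).get? tid with
    | none => (none, [])                          -- unreachable: every chain element is a key
    | some info =>
      match (PySem.Dict.mk info).get? "user_id" with
      | none => (none, [])                        -- Python raises KeyError here: outside Pre_
      | some u =>
        let users' := PySem.Set.add users u
        if 2 < PySem.Set.len users' then (some done.reverse, users')
        else scanChainB td rest (done ++ [tid]) users'

def trace_conversation_alt (start_tweet_id : String) (tweet_dict : List (String × List (String × String))) : Option (List String) × List String :=
  scanChainB tweet_dict (buildChainB tweet_dict (tweet_dict.length + 1) start_tweet_id PySem.Set.empty) [] PySem.Set.empty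

-- ===== PRECONDITION & SPEC =====
-- A raises KeyError when the walk reaches a tweet record lacking 'user_id' or 'replied_tweet_id'; reachability is not
-- closed-form, so when the walk is entered at all (start truthy and a key) Pre_ asks every record to carry both keys —
-- this also excludes some inputs A returns on (a malformed record that the walk never reaches); see cites.
def Pre_trace_conversation (start_tweet_id : String) (tweet_dict : List (String × List (String × String))) : Prop :=
  start_tweet_id = "" ∨ (PySem.Dict.mk tweet_dict).get? start_tweet_id = none ∨
    ∀ p ∈ tweet_dict, ((PySem.Dict.mk p.2).get? "user_id").isSome ∧ ((PySem.Dict.mk p.2).get? "replied_tweet_id").isSome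
instance (start_tweet_id : String) (tweet_dict : List (String × List (String × String))) : Decidable (Pre_trace_conversation start_tweet_id tweet_dict) := by unfold Pre_trace_conversation; infer_instance

def pvWitness_trace_conversation : String × (List (String × List (String × String))) :=
  ("t1", [("t1", [("user_id", "u1"), ("replied_tweet_id", "t2")]), ("t2", [("user_id", "u2"), ("replied_tweet_id", "")])])

def Spec_trace_conversation (start_tweet_id : String) (tweet_dict : List (String × List (String × String))) (out : Option (List String) × List String) : Prop := out = trace_conversation_alt start_tweet_id tweet_dict
instance (start_tweet_id : String) (tweet_dict : List (String × List (String × String))) (out : Option (List String) × List String) : Decidable (Spec_trace_conversation start_tweet_id tweet_dict out) := by unfold Spec_trace_conversation; infer_instance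

-- ===== CLAIM (what is proved, stated in full; the proofs are below) =====
def Claim_equal_trace_conversation : Prop := ∀ (start_tweet_id : String) (tweet_dict : List (String × List (String × String))), Dom_trace_conversation start_tweet_id tweet_dict → Pre_trace_conversation start_tweet_id tweet_dict → Spec_trace_conversation start_tweet_id tweet_dict (trace_conversation start_tweet_id tweet_dict)

-- ===== LEMMAS AND PROOFS =====

-- A's loop-exit return equals B's scan applied to an exhausted chain
lemma finishA_eq_scan_nil (td : List (String × List (String × String)))
    (convo : List String) (users : PySem.Set String) :
    traceFinishA convo users = scanChainB td [] convo users := by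
  simp [traceFinishA, scanChainB, PySem.List.slice?_none_none_neg_one]

-- the heart: A's loop from any state equals B's scan of the chain B would build from that state
lemma loop_eq_scan_build (td : List (String × List (String × String)))
    (hAll : ∀ p ∈ td, ((PySem.Dict.mk p.2).get? "user_id").isSome ∧ ((PySem.Dict.mk p.2).get? "replied_tweet_id").isSome) :
    ∀ (fuel : Nat) (cur : String) (convo : List String) (users visited : PySem.Set String),
      traceLoopA td fuel cur convo users visited = scanChainB td (buildChainB td fuel cur visited) convo users := by
  intro fuel
  induction fuel with
  | zero => intro cur convo users visited; simpa [traceLoopA, buildChainB] using finishA_eq_scan_nil td convo users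
  | succ n ih =>
    intro cur convo users visited
    rcases hinfo : (PySem.Dict.mk td).get? cur with _ | info
    · simpa [traceLoopA, buildChainB, hinfo] using finishA_eq_scan_nil td convo users
    · by_cases hguard : cur ≠ "" ∧ cur ∉ visited
      · have hmem : (cur, info) ∈ td := by
          simpa [PySem.Dict.items] using PySem.Dict.mem_items_of_get?_eq_some (PySem.Dict.mk td) hinfo
        obtain ⟨hu, hr⟩ := hAll (cur, info) hmem
        rcases hu' : (PySem.Dict.mk info).get? "user_id" with _ | u
        · simp [hu', Option.isSome] at hu
        rcases hr' : (PySem.Dict.mk info).get? "replied_tweet_id" with _ | r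
        · simp [hr', Option.isSome] at hr
        have hgetD : (PySem.Dict.mk info).getD "replied_tweet_id" "" = r :=
          PySem.Dict.getD_of_get?_eq_some _ _ hr'
        simp only [traceLoopA, buildChainB, hinfo, if_pos hguard, hu', hgetD]
        simp only [scanChainB, hinfo, hu']
        by_cases hthree : 2 < PySem.Set.len (PySem.Set.add users u)
        · simp only [if_pos hthree, hr']
          simp [PySem.List.slice_to_neg_one, PySem.List.slice?_none_none_neg_one]
        · simp only [if_neg hthree, hr']
          exact ih r (convo ++ [cur]) (PySem.Set.add users u) (PySem.Set.add visited cur)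
      · simpa [traceLoopA, buildChainB, hinfo, hguard] using finishA_eq_scan_nil td convo users

-- when the loop body is never entered (start falsy or not a key), both programs return (None, ∅)
lemma not_entered_eq (start : String) (td : List (String × List (String × String)))
    (h : start = "" ∨ (PySem.Dict.mk td).get? start = none) :
    trace_conversation start td = trace_conversation_alt start td := by
  have hone : ∀ k, traceLoopA td (k + 1) start [] PySem.Set.empty PySem.Set.empty
      = scanChainB td (buildChainB td (k + 1) start PySem.Set.empty) [] PySem.Set.empty := by
    intro k
    rcases hinfo : (PySem.Dict.mk td).get? start with _ | info
    · simpa [traceLoopA, buildChainB, hinfo] using finishA_eq_scan_nil td [] PySem.Set.empty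
    · rcases h with h | h
      · subst h
        simpa [traceLoopA, buildChainB, hinfo] using finishA_eq_scan_nil td [] PySem.Set.empty
      · simp [hinfo] at h
  simpa [trace_conversation, trace_conversation_alt] using hone td.length

-- ===== VERDICT (by name: the statement is the Claim_ definition above) =====
theorem trace_conversation_spec : Claim_equal_trace_conversation := by
  intro start td _ hpre
  unfold Spec_trace_conversation
  rcases hpre with h | h | h
  · exact not_entered_eq start td (Or.inl h)
  · exact not_entered_eq start td (Or.inr h)
  · exact loop_eq_scan_build td h (td.length + 1) start [] PySem.Set.empty PySem.Set.empty
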